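-- pv_equiv track=rewrite | github.com/schmidln/Backgammon | schmidln_agent4/agent4_network.py | index_to_dice_roll
-- ===== SOURCE A (Python) =====
-- from typing import Tuple, Dict, List, Optional
--
-- def index_to_dice_roll(idx: int) -> Tuple[int, int]:
--     """Convert index to dice roll."""
--     i = 0
--     for r1 in range(1, 7):
--         for r2 in range(1, r1 + 1):
--             if i == idx:
--                 return r1, r2
--             i += 1
--     raise ValueError(f"Invalid dice index: {idx}")
-- ===== SOURCE B (Python) =====
-- from typing import Tuple
--
-- # Closed-form inverse-triangular computation instead of A's nested counting loop.
-- def index_to_dice_roll(idx: int) -> Tuple[int, int]: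
--     """Convert index to dice roll."""
--     if not (0 <= idx < 21):
--         raise ValueError(f"Invalid dice index: {idx}")
--     # r1 is 1 plus the number of triangular-number thresholds at or below idx
--     r1 = 1 + sum(idx >= t for t in (1, 3, 6, 10, 15))
--     r2 = idx - r1 * (r1 - 1) // 2 + 1
--     return r1, r2
-- ===== Notes on version B (the rewrite author's own statement) =====
-- stated objective: simpler
-- what changed: Replaces A's nested counting loop over all (r1,r2) pairs with a closed-form computation: r1 from threshold comparisons against triangular numbers, r2 by subtracting the triangular base.
import Mathlib
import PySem

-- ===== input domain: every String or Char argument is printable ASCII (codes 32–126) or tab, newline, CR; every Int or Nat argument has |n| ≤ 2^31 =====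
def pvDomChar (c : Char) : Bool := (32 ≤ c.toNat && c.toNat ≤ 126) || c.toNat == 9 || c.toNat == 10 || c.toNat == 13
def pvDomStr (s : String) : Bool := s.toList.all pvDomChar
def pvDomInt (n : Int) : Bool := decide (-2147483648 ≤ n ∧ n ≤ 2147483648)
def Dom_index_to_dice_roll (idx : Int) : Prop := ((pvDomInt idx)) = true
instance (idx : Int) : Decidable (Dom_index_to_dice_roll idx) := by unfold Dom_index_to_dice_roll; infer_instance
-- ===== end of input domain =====

-- B replaces A's nested counting loop by a closed-form triangular-number computation (objective: simpler).


-- ===== PORT A =====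
-- Nested loop with an early return, carried as (counter, Option result); .getD covers the
-- ValueError path, which Pre_ excludes.
def index_to_dice_roll (idx : Int) : Int × Int :=
  let st := (PySem.List.pyRange 1 7 1).foldl (fun (st : Int × Option (Int × Int)) r1 =>
    (PySem.List.pyRange 1 (r1 + 1) 1).foldl (fun (st : Int × Option (Int × Int)) r2 =>
      match st with
      | (i, none) => if i == idx then (i, some (r1, r2)) else (i + 1, none)
      | s => s) st) (0, none)
  st.2.getD (0, 0)

-- ===== PORT B =====
def index_to_dice_roll_alt (idx : Int) : Int × Int :=
  -- outside 0 ≤ idx < 21 the Python B raises ValueError (excluded by Pre_)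
  if 0 ≤ idx ∧ idx < 21 then
    let r1 : Int := 1 + ([1, 3, 6, 10, 15].foldl (fun acc t => acc + (if t ≤ idx then 1 else 0)) 0)
    let r2 : Int := idx - PySem.Int.floordiv (r1 * (r1 - 1)) 2 + 1
    (r1, r2)
  else (0, 0)

-- ===== PRECONDITION & SPEC =====
-- A raises ValueError exactly when idx is outside 0..20.
def Pre_index_to_dice_roll (idx : Int) : Prop := 0 ≤ idx ∧ idx < 21
instance (idx : Int) : Decidable (Pre_index_to_dice_roll idx) := by unfold Pre_index_to_dice_roll; infer_instance
def pvWitness_index_to_dice_roll : Int := (7)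
def Spec_index_to_dice_roll (idx : Int) (out : Int × Int) : Prop := out = index_to_dice_roll_alt idx
instance (idx : Int) (out : Int × Int) : Decidable (Spec_index_to_dice_roll idx out) := by unfold Spec_index_to_dice_roll; infer_instance

-- ===== CLAIM (what is proved, stated in full; the proofs are below) =====
def Claim_equal_index_to_dice_roll : Prop := ∀ (idx : Int), Dom_index_to_dice_roll idx → Pre_index_to_dice_roll idx → Spec_index_to_dice_roll idx (index_to_dice_roll idx)

-- ===== LEMMAS AND PROOFS =====

-- ===== VERDICT (by name: the statement is the Claim_ definition above) =====
theorem index_to_dice_roll_spec : Claim_equal_index_to_dice_roll := by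
  unfold Claim_equal_index_to_dice_roll
  intro idx _ hpre
  obtain ⟨h0, h21⟩ := hpre
  unfold Spec_index_to_dice_roll
  interval_cases idx <;> decide
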